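-- pv_equiv track=rewrite | github.com/pagarc24/TFG_IdIoT | scripts/test.py | must_be_highlighted
-- ===== SOURCE A (Python) =====
-- def must_be_highlighted(score_category, vectorstring, cwe, vulnerabiltyConfirmed):#TODO - Revisar criterios, hay demasiado, especialmente en el vector string
--     to_highlight = False
--     criteria = ''
--
--     if vulnerabiltyConfirmed:
--         #Score Category Criteria
--         if score_category == "CRITICAL":
--             to_highlight = True
--             criteria += '\t- Critical Category\n'
--         """elif score_category == "HIGH":
--             to_highlight = True
--             criteria += '\t- High Category\n'"""
--
--         #Vector String Criteria
--         if vectorstring != '':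
--             vector_dict = {str(i.split(':')[0]): str(i.split(':')[1]) for i in vectorstring.split("/")}
--             vector_dict['CVSS'] = '2' if 'CVSS' not in vector_dict else vector_dict['CVSS']
--             #criteria+=f'\n{vector_dict}\n'
--
--             if vector_dict['CVSS'] == '2':
--                 if 'AV' in vector_dict and vector_dict['AV'] == 'N':
--                     to_highlight = True
--                     criteria += '\t- Remotely exploitable\n'
--                 if 'AC' in vector_dict and vector_dict['AC'] == 'L':
--                     to_highlight = True
--                     criteria += '\t- Low complexity access\n'
--                 if 'Au' in vector_dict and vector_dict['Au'] == 'N':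
--                     to_highlight = True
--                     criteria += '\t- No authentication required to exploit the vulnerability\n'
--                 if 'C' in vector_dict and vector_dict['C'] == 'C':
--                     to_highlight = True
--                     criteria += '\t- Complete impact on data confidentiality\n'
--                 if 'I' in vector_dict and vector_dict['I'] == 'C':
--                     to_highlight = True
--                     criteria += '\t- Complete impact on system integrity\n'
--                 if 'A' in vector_dict and vector_dict['A'] == 'C':
--                     to_highlight = True
--                     criteria += '\t- Complete impact on system availability\n'
--             elif vector_dict['CVSS'] == '3.0' or vector_dict['CVSS'] == '3.1':
--                 if 'AV' in vector_dict and vector_dict['AV'] == 'N':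
--                     to_highlight = True
--                     criteria += '\t- Remotely exploitable\n'
--                 if 'AC' in vector_dict and vector_dict['AC'] == 'L':
--                     to_highlight = True
--                     criteria += '\t- Low complexity access\n'
--                 if 'PR' in vector_dict and vector_dict['PR'] == 'N':
--                     to_highlight = True
--                     criteria += '\t- Attacker does not required any privileges to attack the system\n'
--                 if 'UI' in vector_dict and vector_dict['UI'] == 'N':
--                     to_highlight = True
--                     criteria += '\t- The vulnerability can be exploited without interaction from any user\n'
--                 if 'S' in vector_dict and vector_dict['S'] == 'C':
--                     to_highlight = True
--                     criteria += '\t- The vulnerability can affect other components\n'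
--                 if 'C' in vector_dict and vector_dict['C'] == 'H':
--                     to_highlight = True
--                     criteria += '\t- Complete impact on data confidentiality\n'
--                 if 'I' in vector_dict and vector_dict['I'] == 'H':
--                     to_highlight = True
--                     criteria += '\t- Complete impact on system integrity\n'
--                 if 'A' in vector_dict and vector_dict['A'] == 'H':
--                     to_highlight = True
--                     criteria += '\t- Complete impact on system availability\n'
--             elif vector_dict['CVSS'] == '4.0':
--                 if 'AV' in vector_dict and vector_dict['AV'] == 'N':
--                     to_highlight = True
--                     criteria += '\t- Remotely exploitable\n'
--                 if 'AC' in vector_dict and vector_dict['AC'] == 'L':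
--                     to_highlight = True
--                     criteria += '\t- Low complexity access\n'
--                 if 'AT' in vector_dict and vector_dict['AT'] == 'N':#
--                     to_highlight = True
--                     criteria += '\t- Does not depend on specific conditions\n'
--                 if 'PR' in vector_dict and vector_dict['PR'] == 'N':
--                     to_highlight = True
--                     criteria += '\t- Attacker does not required any privileges to attack the system\n'
--                 if 'UI' in vector_dict and vector_dict['UI'] == 'N':
--                     to_highlight = True
--                     criteria += '\t- The vulnerability can be exploited without interaction from any user\n'
--                 if ('VC' in vector_dict and vector_dict['VC'] == 'H') or ('SC' in vector_dict and vector_dict['SC'] == 'H'):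
--                     to_highlight = True
--                     criteria += '\t- Complete impact on data confidentiality\n'
--                 if ('VI' in vector_dict and vector_dict['VI'] == 'H') or ('SI' in vector_dict and vector_dict['SI'] == 'H'):
--                     to_highlight = True
--                     criteria += '\t- Complete impact on system integrity\n'
--                 if ('VA' in vector_dict and vector_dict['VA'] == 'H') or ('SA' in vector_dict and vector_dict['SA'] == 'H'):
--                     to_highlight = True
--                     criteria += '\t- Complete impact on system availability\n'
--
--             #CWE Criteria
--             #Following https://cwe.mitre.org/top25/ (2024), we choose the top 5 dangerous CWE
--             if cwe in ['CWE-79', 'CWE-787', 'CWE-89', 'CWE-352', 'CWE-22']: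
--                 to_highlight = True
--                 criteria += '\t- The CWE associated with this vulnerability is in the top 5 (2024) most dangerous CWE\n'
--     else:
--         to_highlight = True
--         criteria += "\t- We can't confirm it affects you — please be cautious just in case\n"
--
--     return to_highlight, criteria
-- ===== SOURCE B (Python) =====
-- # Table-driven rewrite: CVSS rules as data (version -> ordered (message, alternatives) list)
-- # instead of four hand-written if-chains; one loop evaluates them.
--
-- _TOP5 = ('CWE-79', 'CWE-787', 'CWE-89', 'CWE-352', 'CWE-22')
--
-- _R3 = [
--     ('\t- Remotely exploitable\n', [('AV', 'N')]),
--     ('\t- Low complexity access\n', [('AC', 'L')]),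
--     ('\t- Attacker does not required any privileges to attack the system\n', [('PR', 'N')]),
--     ('\t- The vulnerability can be exploited without interaction from any user\n', [('UI', 'N')]),
--     ('\t- The vulnerability can affect other components\n', [('S', 'C')]),
--     ('\t- Complete impact on data confidentiality\n', [('C', 'H')]),
--     ('\t- Complete impact on system integrity\n', [('I', 'H')]),
--     ('\t- Complete impact on system availability\n', [('A', 'H')]),
-- ]
--
-- _RULES = {
--     '2': [
--         ('\t- Remotely exploitable\n', [('AV', 'N')]),
--         ('\t- Low complexity access\n', [('AC', 'L')]),
--         ('\t- No authentication required to exploit the vulnerability\n', [('Au', 'N')]),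
--         ('\t- Complete impact on data confidentiality\n', [('C', 'C')]),
--         ('\t- Complete impact on system integrity\n', [('I', 'C')]),
--         ('\t- Complete impact on system availability\n', [('A', 'C')]),
--     ],
--     '3.0': _R3,
--     '3.1': _R3,
--     '4.0': [
--         ('\t- Remotely exploitable\n', [('AV', 'N')]),
--         ('\t- Low complexity access\n', [('AC', 'L')]),
--         ('\t- Does not depend on specific conditions\n', [('AT', 'N')]),
--         ('\t- Attacker does not required any privileges to attack the system\n', [('PR', 'N')]),
--         ('\t- The vulnerability can be exploited without interaction from any user\n', [('UI', 'N')]),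
--         ('\t- Complete impact on data confidentiality\n', [('VC', 'H'), ('SC', 'H')]),
--         ('\t- Complete impact on system integrity\n', [('VI', 'H'), ('SI', 'H')]),
--         ('\t- Complete impact on system availability\n', [('VA', 'H'), ('SA', 'H')]),
--     ],
-- }
--
--
-- def must_be_highlighted(score_category, vectorstring, cwe, vulnerabiltyConfirmed):
--     if not vulnerabiltyConfirmed:
--         return True, "\t- We can't confirm it affects you — please be cautious just in case\n"
--     messages = []
--     if score_category == "CRITICAL":
--         messages.append('\t- Critical Category\n')
--     if vectorstring != '':
--         vector_dict = {str(i.split(':')[0]): str(i.split(':')[1]) for i in vectorstring.split("/")}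
--         for message, alternatives in _RULES.get(vector_dict.get('CVSS', '2'), []):
--             if any(vector_dict.get(k) == v for k, v in alternatives):
--                 messages.append(message)
--         if cwe in _TOP5:
--             messages.append('\t- The CWE associated with this vulnerability is in the top 5 (2024) most dangerous CWE\n')
--     return bool(messages), ''.join(messages)
-- ===== Notes on version B (the rewrite author's own statement) =====
-- stated objective: simpler
-- what changed: Replaces A's four hand-written per-CVSS-version if-chains and threaded (flag, criteria-string) state by a version-to-rule-table (message plus OR-alternative key/value pairs) evaluated by one loop that collects matched messages into a list, finally returning (list nonempty, joined messages).
import Mathlib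
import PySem

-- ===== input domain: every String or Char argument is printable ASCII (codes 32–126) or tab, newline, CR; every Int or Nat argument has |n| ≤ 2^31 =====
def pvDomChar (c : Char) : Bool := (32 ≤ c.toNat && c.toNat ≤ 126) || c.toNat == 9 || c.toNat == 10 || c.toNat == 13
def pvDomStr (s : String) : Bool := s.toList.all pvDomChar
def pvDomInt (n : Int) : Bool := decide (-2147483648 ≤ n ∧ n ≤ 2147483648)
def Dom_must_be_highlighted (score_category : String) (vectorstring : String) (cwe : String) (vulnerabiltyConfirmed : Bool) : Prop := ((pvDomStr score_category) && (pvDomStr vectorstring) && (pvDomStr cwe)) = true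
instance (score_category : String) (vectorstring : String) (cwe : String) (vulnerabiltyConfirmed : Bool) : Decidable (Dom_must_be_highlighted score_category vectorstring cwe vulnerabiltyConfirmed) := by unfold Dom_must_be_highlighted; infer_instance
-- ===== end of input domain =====

-- B replaces A's four hand-written per-CVSS-version if-chains by a version→rule-table evaluated
-- by one loop (objective: simpler); return values agree on every input where A returns.

-- ===== PORT A =====

-- shared by both ports: both Pythons build vector_dict with the identical comprehension
-- {str(i.split(':')[0]): str(i.split(':')[1]) for i in vectorstring.split("/")}.
-- sep "/" and ":" are nonempty so split? is always `some`; i.split(':')[1] raises IndexError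
-- exactly when a segment has no ':' — excluded by Pre_, so the `getD 1 ""` is exact there.
def pvParseVector (vectorstring : String) : PySem.Dict String String :=
  ((PySem.Str.split? vectorstring "/").getD []).foldl
    (fun d i =>
      d.insert (((PySem.Str.split? i ":").getD []).getD 0 "")
               (((PySem.Str.split? i ":").getD []).getD 1 ""))
    PySem.Dict.empty

-- Python "k in vector_dict and vector_dict[k] == v": the `in` guard plus the (guarded) lookup,
-- combined through get? (some w exactly when the key is present).
def pvHasEq (d : PySem.Dict String String) (k v : String) : Bool :=
  match d.get? k with
  | some w => w == v
  | none => false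

def pvChecksV2 (vd : PySem.Dict String String) (st : Bool × String) : Bool × String :=
  let st := if pvHasEq vd "AV" "N" then (true, st.2 ++ "\t- Remotely exploitable\n") else st
  let st := if pvHasEq vd "AC" "L" then (true, st.2 ++ "\t- Low complexity access\n") else st
  let st := if pvHasEq vd "Au" "N" then (true, st.2 ++ "\t- No authentication required to exploit the vulnerability\n") else st
  let st := if pvHasEq vd "C" "C" then (true, st.2 ++ "\t- Complete impact on data confidentiality\n") else st
  let st := if pvHasEq vd "I" "C" then (true, st.2 ++ "\t- Complete impact on system integrity\n") else st
  let st := if pvHasEq vd "A" "C" then (true, st.2 ++ "\t- Complete impact on system availability\n") else st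
  st

def pvChecksV3 (vd : PySem.Dict String String) (st : Bool × String) : Bool × String :=
  let st := if pvHasEq vd "AV" "N" then (true, st.2 ++ "\t- Remotely exploitable\n") else st
  let st := if pvHasEq vd "AC" "L" then (true, st.2 ++ "\t- Low complexity access\n") else st
  let st := if pvHasEq vd "PR" "N" then (true, st.2 ++ "\t- Attacker does not required any privileges to attack the system\n") else st
  let st := if pvHasEq vd "UI" "N" then (true, st.2 ++ "\t- The vulnerability can be exploited without interaction from any user\n") else st
  let st := if pvHasEq vd "S" "C" then (true, st.2 ++ "\t- The vulnerability can affect other components\n") else st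
  let st := if pvHasEq vd "C" "H" then (true, st.2 ++ "\t- Complete impact on data confidentiality\n") else st
  let st := if pvHasEq vd "I" "H" then (true, st.2 ++ "\t- Complete impact on system integrity\n") else st
  let st := if pvHasEq vd "A" "H" then (true, st.2 ++ "\t- Complete impact on system availability\n") else st
  st

def pvChecksV4 (vd : PySem.Dict String String) (st : Bool × String) : Bool × String :=
  let st := if pvHasEq vd "AV" "N" then (true, st.2 ++ "\t- Remotely exploitable\n") else st
  let st := if pvHasEq vd "AC" "L" then (true, st.2 ++ "\t- Low complexity access\n") else st
  let st := if pvHasEq vd "AT" "N" then (true, st.2 ++ "\t- Does not depend on specific conditions\n") else st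
  let st := if pvHasEq vd "PR" "N" then (true, st.2 ++ "\t- Attacker does not required any privileges to attack the system\n") else st
  let st := if pvHasEq vd "UI" "N" then (true, st.2 ++ "\t- The vulnerability can be exploited without interaction from any user\n") else st
  let st := if pvHasEq vd "VC" "H" || pvHasEq vd "SC" "H" then (true, st.2 ++ "\t- Complete impact on data confidentiality\n") else st
  let st := if pvHasEq vd "VI" "H" || pvHasEq vd "SI" "H" then (true, st.2 ++ "\t- Complete impact on system integrity\n") else st
  let st := if pvHasEq vd "VA" "H" || pvHasEq vd "SA" "H" then (true, st.2 ++ "\t- Complete impact on system availability\n") else st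
  st

def must_be_highlighted (score_category : String) (vectorstring : String) (cwe : String) (vulnerabiltyConfirmed : Bool) : Bool × String :=
  let st : Bool × String := (false, "")
  if vulnerabiltyConfirmed then
    let st := if score_category == "CRITICAL" then (true, st.2 ++ "\t- Critical Category\n") else st
    if vectorstring != "" then
      let vd := pvParseVector vectorstring
      -- vector_dict['CVSS'] = '2' if 'CVSS' not in vector_dict else vector_dict['CVSS']
      let vd := vd.insert "CVSS" (match vd.get? "CVSS" with | none => "2" | some w => w)
      let st :=
        if vd.getD "CVSS" "" == "2" then pvChecksV2 vd st
        else if vd.getD "CVSS" "" == "3.0" || vd.getD "CVSS" "" == "3.1" then pvChecksV3 vd st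
        else if vd.getD "CVSS" "" == "4.0" then pvChecksV4 vd st
        else st
      let st := if ["CWE-79", "CWE-787", "CWE-89", "CWE-352", "CWE-22"].contains cwe
        then (true, st.2 ++ "\t- The CWE associated with this vulnerability is in the top 5 (2024) most dangerous CWE\n") else st
      st
    else st
  else
    (true, st.2 ++ "\t- We can't confirm it affects you — please be cautious just in case\n")

-- ===== PORT B =====

def pvRulesV2 : List (String × List (String × String)) :=
  [("\t- Remotely exploitable\n", [("AV", "N")]),
   ("\t- Low complexity access\n", [("AC", "L")]),
   ("\t- No authentication required to exploit the vulnerability\n", [("Au", "N")]),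
   ("\t- Complete impact on data confidentiality\n", [("C", "C")]),
   ("\t- Complete impact on system integrity\n", [("I", "C")]),
   ("\t- Complete impact on system availability\n", [("A", "C")])]

def pvRulesV3 : List (String × List (String × String)) :=
  [("\t- Remotely exploitable\n", [("AV", "N")]),
   ("\t- Low complexity access\n", [("AC", "L")]),
   ("\t- Attacker does not required any privileges to attack the system\n", [("PR", "N")]),
   ("\t- The vulnerability can be exploited without interaction from any user\n", [("UI", "N")]),
   ("\t- The vulnerability can affect other components\n", [("S", "C")]),
   ("\t- Complete impact on data confidentiality\n", [("C", "H")]),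
   ("\t- Complete impact on system integrity\n", [("I", "H")]),
   ("\t- Complete impact on system availability\n", [("A", "H")])]

def pvRulesV4 : List (String × List (String × String)) :=
  [("\t- Remotely exploitable\n", [("AV", "N")]),
   ("\t- Low complexity access\n", [("AC", "L")]),
   ("\t- Does not depend on specific conditions\n", [("AT", "N")]),
   ("\t- Attacker does not required any privileges to attack the system\n", [("PR", "N")]),
   ("\t- The vulnerability can be exploited without interaction from any user\n", [("UI", "N")]),
   ("\t- Complete impact on data confidentiality\n", [("VC", "H"), ("SC", "H")]),
   ("\t- Complete impact on system integrity\n", [("VI", "H"), ("SI", "H")]),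
   ("\t- Complete impact on system availability\n", [("VA", "H"), ("SA", "H")])]

-- the _RULES dict of Source B
def pvRules : PySem.Dict String (List (String × List (String × String))) :=
  ((((PySem.Dict.empty).insert "2" pvRulesV2).insert "3.0" pvRulesV3).insert "3.1" pvRulesV3).insert "4.0" pvRulesV4

def must_be_highlighted_alt (score_category : String) (vectorstring : String) (cwe : String) (vulnerabiltyConfirmed : Bool) : Bool × String :=
  if !vulnerabiltyConfirmed then
    (true, "\t- We can't confirm it affects you — please be cautious just in case\n")
  else
    let messages : List String := []
    let messages := if score_category == "CRITICAL" then messages ++ ["\t- Critical Category\n"] else messages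
    if vectorstring != "" then
      let vd := pvParseVector vectorstring
      let messages := (pvRules.getD (vd.getD "CVSS" "2") []).foldl
        (fun acc r => if r.2.any (fun kv => vd.get? kv.1 == some kv.2) then acc ++ [r.1] else acc)
        messages
      let messages := if ["CWE-79", "CWE-787", "CWE-89", "CWE-352", "CWE-22"].contains cwe
        then messages ++ ["\t- The CWE associated with this vulnerability is in the top 5 (2024) most dangerous CWE\n"] else messages
      (!messages.isEmpty, PySem.Str.join "" messages)
    else
      (!messages.isEmpty, PySem.Str.join "" messages)

-- ===== PRECONDITION & SPEC =====

-- Pre_ excludes exactly the inputs where Python A raises IndexError: a confirmed vulnerability with a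
-- nonempty vectorstring one of whose '/'-separated segments has no ':' (i.split(':')[1] fails).
def Pre_must_be_highlighted (score_category : String) (vectorstring : String) (cwe : String) (vulnerabiltyConfirmed : Bool) : Prop :=
  vulnerabiltyConfirmed = true → vectorstring ≠ "" →
    ((PySem.Str.split? vectorstring "/").getD []).all (fun seg => PySem.Str.isIn ":" seg) = true
instance (score_category : String) (vectorstring : String) (cwe : String) (vulnerabiltyConfirmed : Bool) : Decidable (Pre_must_be_highlighted score_category vectorstring cwe vulnerabiltyConfirmed) := by unfold Pre_must_be_highlighted; infer_instance

def pvWitness_must_be_highlighted : String × String × String × Bool := ("CRITICAL", "CVSS:3.1/AV:N/AC:L", "CWE-79", true)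

def Spec_must_be_highlighted (score_category : String) (vectorstring : String) (cwe : String) (vulnerabiltyConfirmed : Bool) (out : Bool × String) : Prop := out = must_be_highlighted_alt score_category vectorstring cwe vulnerabiltyConfirmed
instance (score_category : String) (vectorstring : String) (cwe : String) (vulnerabiltyConfirmed : Bool) (out : Bool × String) : Decidable (Spec_must_be_highlighted score_category vectorstring cwe vulnerabiltyConfirmed out) := by unfold Spec_must_be_highlighted; infer_instance

-- ===== CLAIM (what is proved, stated in full; the proofs are below) =====
def Claim_equal_must_be_highlighted : Prop := ∀ (score_category : String) (vectorstring : String) (cwe : String) (vulnerabiltyConfirmed : Bool), Dom_must_be_highlighted score_category vectorstring cwe vulnerabiltyConfirmed → Pre_must_be_highlighted score_category vectorstring cwe vulnerabiltyConfirmed → Spec_must_be_highlighted score_category vectorstring cwe vulnerabiltyConfirmed (must_be_highlighted score_category vectorstring cwe vulnerabiltyConfirmed)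

-- ===== LEMMAS AND PROOFS =====

-- condition of one rule row against the parsed vector
def pvCond (vd : PySem.Dict String String) (r : String × List (String × String)) : Bool :=
  r.2.any (fun kv => vd.get? kv.1 == some kv.2)

-- a list of already-evaluated (condition, message) steps, applied A-style
def pvApplyC (ps : List (Bool × String)) (st : Bool × String) : Bool × String :=
  ps.foldl (fun st p => if p.1 then (true, st.2 ++ p.2) else st) st

def pvPick (ps : List (Bool × String)) : List String := (ps.filter (·.1)).map (·.2)

def pvCondsOf (vd : PySem.Dict String String) (R : List (String × List (String × String))) : List (Bool × String) :=
  R.map (fun r => (pvCond vd r, r.1))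

lemma pvJoin_cons (x : String) (xs : List String) :
    PySem.Str.join "" (x :: xs) = x ++ PySem.Str.join "" xs := by
  cases xs <;> simp [PySem.Str.join, PySem.Chars.join, List.intercalate]

lemma pvApplyC_eq (ps : List (Bool × String)) (h : Bool) (c : String) :
    pvApplyC ps (h, c) = (h || !(pvPick ps).isEmpty, c ++ PySem.Str.join "" (pvPick ps)) := by
  induction ps generalizing h c with
  | nil => simp [pvApplyC, pvPick, PySem.Str.join, PySem.Chars.join, List.intercalate]
  | cons p ps ih =>
    obtain ⟨b, m⟩ := p
    cases b
    · simp only [pvApplyC, List.foldl_cons, if_neg (by simp : ¬((false, m).1 = true))] at *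
      rw [ih]
      simp [pvPick]
    · simp only [pvApplyC, List.foldl_cons] at *
      rw [ih]
      simp [pvPick, pvJoin_cons, String.append_assoc]

lemma pvHasEq_eq (d : PySem.Dict String String) (k v : String) :
    pvHasEq d k v = (d.get? k == some v) := by
  cases h : d.get? k <;> simp [pvHasEq, h]

lemma pvChecksV2_eq (vd : PySem.Dict String String) (st : Bool × String) :
    pvChecksV2 vd st = pvApplyC (pvCondsOf vd pvRulesV2) st := by
  simp [pvChecksV2, pvApplyC, pvCondsOf, pvRulesV2, pvCond, pvHasEq_eq]

lemma pvChecksV3_eq (vd : PySem.Dict String String) (st : Bool × String) :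
    pvChecksV3 vd st = pvApplyC (pvCondsOf vd pvRulesV3) st := by
  simp [pvChecksV3, pvApplyC, pvCondsOf, pvRulesV3, pvCond, pvHasEq_eq]

lemma pvChecksV4_eq (vd : PySem.Dict String String) (st : Bool × String) :
    pvChecksV4 vd st = pvApplyC (pvCondsOf vd pvRulesV4) st := by
  simp [pvChecksV4, pvApplyC, pvCondsOf, pvRulesV4, pvCond, pvHasEq_eq]

lemma pvFoldB (vd : PySem.Dict String String) (R : List (String × List (String × String)))
    (msgs : List String) :
    R.foldl (fun acc r => if r.2.any (fun kv => vd.get? kv.1 == some kv.2) then acc ++ [r.1] else acc) msgs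
      = msgs ++ pvPick (pvCondsOf vd R) := by
  refine (PySem.List.foldl_append_if (pvCond vd) (fun r => r.1) R msgs).trans ?_
  simp only [pvPick, pvCondsOf, List.filter_map, List.map_map]
  rfl

-- inserting "CVSS" does not change the evaluation of any rule row (their keys differ from "CVSS")
lemma pvAny_insert (d : PySem.Dict String String) (v : String) (l : List (String × String))
    (hk : ∀ kv ∈ l, kv.1 ≠ "CVSS") :
    (l.any fun kv => (d.insert "CVSS" v).get? kv.1 == some kv.2)
      = (l.any fun kv => d.get? kv.1 == some kv.2) := by
  induction l with
  | nil => rfl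
  | cons a t ih =>
    simp only [List.any_cons,
      PySem.Dict.get?_insert_of_ne d v (hk a (by simp)),
      ih (fun kv h => hk kv (by simp [h]))]

lemma pvCondsOf_insert (d : PySem.Dict String String) (v : String)
    (R : List (String × List (String × String)))
    (hk : ∀ r ∈ R, ∀ kv ∈ r.2, kv.1 ≠ "CVSS") :
    pvCondsOf (d.insert "CVSS" v) R = pvCondsOf d R := by
  unfold pvCondsOf
  exact List.map_congr_left (fun r hr => by
    unfold pvCond; rw [pvAny_insert d v r.2 (hk r hr)])

lemma pvJoin_nil : PySem.Str.join "" [] = "" := rfl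

lemma pvJoin_append (xs ys : List String) :
    PySem.Str.join "" (xs ++ ys) = PySem.Str.join "" xs ++ PySem.Str.join "" ys := by
  induction xs with
  | nil => simp [pvJoin_nil]
  | cons x xs ih => simp [pvJoin_cons, ih, String.append_assoc]

lemma pvFinal (ps : List (Bool × String)) (critb cweb : Bool) (mC mW : String) :
    (if cweb then (true, (pvApplyC ps (if critb then (true, "" ++ mC) else (false, ""))).2 ++ mW)
     else pvApplyC ps (if critb then (true, "" ++ mC) else (false, ""))) =
    (!(if cweb then ((if critb then ([] : List String) ++ [mC] else []) ++ pvPick ps) ++ [mW]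
        else (if critb then ([] : List String) ++ [mC] else []) ++ pvPick ps).isEmpty,
     PySem.Str.join "" (if cweb then ((if critb then ([] : List String) ++ [mC] else []) ++ pvPick ps) ++ [mW]
        else (if critb then ([] : List String) ++ [mC] else []) ++ pvPick ps)) := by
  cases critb <;> cases cweb <;>
    simp [pvApplyC_eq, pvJoin_append, pvJoin_cons, pvJoin_nil, String.append_assoc]

theorem must_be_highlighted_eq (score_category vectorstring cwe : String) (vulnerabiltyConfirmed : Bool) :
    must_be_highlighted score_category vectorstring cwe vulnerabiltyConfirmed
      = must_be_highlighted_alt score_category vectorstring cwe vulnerabiltyConfirmed := by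
  unfold must_be_highlighted must_be_highlighted_alt
  cases vulnerabiltyConfirmed with
  | false => simp
  | true =>
    simp only [Bool.not_true, Bool.false_eq_true, if_neg (by simp : ¬(false = true))]
    by_cases hvs : vectorstring = ""
    · subst hvs
      simp only [bne_self_eq_false, Bool.false_eq_true, if_neg (by simp : ¬(false = true))]
      by_cases hc : (score_category == "CRITICAL") = true
      · simp [hc, pvJoin_cons, pvJoin_nil]
      · simp [hc, pvJoin_nil]
    · have hne : (vectorstring != "") = true := by simp [bne, hvs]
      simp only [hne, if_pos rfl, if_pos trivial]
      have hw : (match (pvParseVector vectorstring).get? "CVSS" with | none => "2" | some w => w)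
          = (pvParseVector vectorstring).getD "CVSS" "2" := by
        cases h : (pvParseVector vectorstring).get? "CVSS" <;> simp [PySem.Dict.getD, h]
      rw [hw]
      generalize pvParseVector vectorstring = vd
      rw [PySem.Dict.getD_insert_self]
      generalize vd.getD "CVSS" "2" = v0
      by_cases h2 : v0 = "2"
      · subst h2
        have hr : pvRules.getD "2" [] = pvRulesV2 := rfl
        rw [hr, pvChecksV2_eq, pvCondsOf_insert _ _ _ (by decide), pvFoldB]
        simp only [if_pos (by decide : (("2" : String) == "2") = true)]
        exact pvFinal _ _ _ _ _
      · have hc2 : (v0 == "2") = false := beq_eq_false_iff_ne.mpr h2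
        by_cases h3 : v0 = "3.0"
        · subst h3
          have hr : pvRules.getD "3.0" [] = pvRulesV3 := rfl
          rw [hr, pvChecksV3_eq, pvCondsOf_insert _ _ _ (by decide), pvFoldB]
          simp only [hc2, Bool.false_eq_true, if_neg (by simp : ¬(false = true)),
            if_pos (by decide : ((("3.0" : String) == "3.0") || (("3.0" : String) == "3.1")) = true)]
          exact pvFinal _ _ _ _ _
        · by_cases h31 : v0 = "3.1"
          · subst h31
            have hr : pvRules.getD "3.1" [] = pvRulesV3 := rfl
            rw [hr, pvChecksV3_eq, pvCondsOf_insert _ _ _ (by decide), pvFoldB]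
            simp only [hc2, Bool.false_eq_true, if_neg (by simp : ¬(false = true)),
              if_pos (by decide : ((("3.1" : String) == "3.0") || (("3.1" : String) == "3.1")) = true)]
            exact pvFinal _ _ _ _ _
          · have hc3 : (v0 == "3.0") = false := beq_eq_false_iff_ne.mpr h3
            have hc31 : (v0 == "3.1") = false := beq_eq_false_iff_ne.mpr h31
            by_cases h4 : v0 = "4.0"
            · subst h4
              have hr : pvRules.getD "4.0" [] = pvRulesV4 := rfl
              rw [hr, pvChecksV4_eq, pvCondsOf_insert _ _ _ (by decide), pvFoldB]
              simp only [hc2, hc3, hc31, Bool.or_self, Bool.false_eq_true,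
                if_neg (by simp : ¬(false = true)),
                if_pos (by decide : ((("4.0" : String) == "4.0")) = true)]
              exact pvFinal _ _ _ _ _
            · have hc4 : (v0 == "4.0") = false := beq_eq_false_iff_ne.mpr h4
              have hnone : pvRules.getD v0 [] = [] := by
                have e : pvRules
                    = PySem.Dict.mk [("2", pvRulesV2), ("3.0", pvRulesV3), ("3.1", pvRulesV3), ("4.0", pvRulesV4)] := rfl
                simp [PySem.Dict.getD, e, PySem.Dict.get?_mk_cons, PySem.Dict.get?,
                  beq_eq_false_iff_ne.mpr (Ne.symm h2), beq_eq_false_iff_ne.mpr (Ne.symm h3),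
                  beq_eq_false_iff_ne.mpr (Ne.symm h31), beq_eq_false_iff_ne.mpr (Ne.symm h4)]
              rw [hnone, pvFoldB vd []]
              simp only [hc2, hc3, hc31, hc4, Bool.or_self, Bool.false_eq_true,
                if_neg (by simp : ¬(false = true))]
              exact pvFinal (pvCondsOf vd []) _ _ _ _

-- ===== VERDICT (by name: the statement is the Claim_ definition above) =====
theorem must_be_highlighted_spec : Claim_equal_must_be_highlighted := by
  intro sc vs cwe conf _ _
  unfold Spec_must_be_highlighted
  exact must_be_highlighted_eq sc vs cwe conf
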